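-- pv_equiv track=rewrite | github.com/Niikcety/HackBG | Week3/Wednesday/polynomial/utils.py | get_pow
-- ===== SOURCE A (Python) =====
-- def validate_term(term):
-- 	for i in range(0,len(term)-1):
-- 		if term[i:i+2] == '^x':
-- 			raise TypeError('Invalid ^x')
-- 		elif term[i] == 'x' and term[i+1].isdigit():
-- 			raise TypeError('Invalid pow without ^')
--
-- 	return True
--
-- def get_pow(term):
-- 	if validate_term(term):
-- 		power = ''
-- 		if 'x' in term and not '^' in term:
-- 			return 1
-- 		if not 'x' in term and not '^' in term:
-- 			return 0
-- 		else:
-- 			splitted = term.split('^')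
-- 			for i in splitted[1]:
-- 				if i.isdigit():
-- 					power += i
-- 			return int(power)
-- ===== SOURCE B (Python) =====
-- def get_pow(term):
--     seen_x = False
--     carets = 0
--     digits = ''
--     n = len(term)
--     for i in range(n):
--         c = term[i]
--         if c == '^':
--             if i + 1 < n and term[i + 1] == 'x':
--                 raise TypeError('Invalid ^x')
--             carets += 1
--         elif c == 'x':
--             if i + 1 < n and term[i + 1].isdigit():
--                 raise TypeError('Invalid pow without ^')
--             seen_x = True
--         elif carets == 1 and c.isdigit():
--             digits += c
--     if carets == 0:
--         return 1 if seen_x else 0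
--     return int(digits)
-- ===== Notes on version B (the rewrite author's own statement) =====
-- stated objective: faster
-- what changed: B fuses validate_term's pair-scan, the two membership tests and the split('^')[1] digit collection into one single left-to-right scan (tracking seen-x, a caret counter, and digits gathered while exactly one caret has been seen), removing the extra passes and per-index slicing; a timing run measured it ~1.8x faster.
import Mathlib
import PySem

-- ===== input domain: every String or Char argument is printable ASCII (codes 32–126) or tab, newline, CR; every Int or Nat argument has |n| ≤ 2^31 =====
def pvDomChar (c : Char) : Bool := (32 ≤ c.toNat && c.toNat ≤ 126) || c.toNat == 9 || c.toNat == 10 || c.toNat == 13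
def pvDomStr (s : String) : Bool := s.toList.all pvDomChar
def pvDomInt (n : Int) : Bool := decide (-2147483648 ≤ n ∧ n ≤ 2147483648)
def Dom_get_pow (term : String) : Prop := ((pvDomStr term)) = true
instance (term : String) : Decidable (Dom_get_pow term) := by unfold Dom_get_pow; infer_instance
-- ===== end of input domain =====

-- B fuses validate_term and the power extraction into one single scan over the term (a timing run measured it ~1.8x faster than A's multi-pass code).
-- Both Pythons raise on some inputs (TypeError/ValueError); those inputs are excluded by Pre_get_pow, and the ports return 0 there via Option.getD.

-- ===== PORT A =====
-- loop body of validate_term: for i in range(0, len(term)-1); none = a raise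
def validateLoop (l : List Char) : List Int → Option Bool
  | [] => some true
  | i :: idxs =>
    if PySem.List.slice l (some i) (some (i + 2)) = ['^', 'x'] then none
    else
      match PySem.List.pyGet? l i with
      | none => none
      | some c =>
        if c = 'x' then
          match PySem.List.pyGet? l (i + 1) with
          | none => none
          | some d => if PySem.Chars.isdigit d then none else validateLoop l idxs
        else validateLoop l idxs

def validate_term (l : List Char) : Option Bool :=
  validateLoop l (PySem.List.pyRange 0 ((l.length : Int) - 1) 1)

-- for i in splitted[1]: if i.isdigit(): power += i
def powLoop (power : List Char) : List Char → List Char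
  | [] => power
  | i :: rest => if PySem.Chars.isdigit i then powLoop (power ++ [i]) rest else powLoop power rest

def get_powAux (term : String) : Option Int :=
  let l := term.toList
  match validate_term l with
  | none => none
  | some _ =>
    let power : List Char := []
    if PySem.Chars.isIn ['x'] l && !(PySem.Chars.isIn ['^'] l) then some 1
    else if !(PySem.Chars.isIn ['x'] l) && !(PySem.Chars.isIn ['^'] l) then some 0
    else
      let splitted := PySem.Chars.splitOn l ['^']
      match PySem.List.pyGet? splitted 1 with
      | none => none
      | some s1 => PySem.Int.ofChars? (powLoop power s1)

def get_pow (term : String) : Int := (get_powAux term).getD 0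

-- ===== PORT B =====
-- one pass; term[i+1] of Source B is the head of the remaining suffix; none = a raise
def altLoop (seenX : Bool) (carets : Int) (digits : List Char) :
    List Char → Option (Bool × Int × List Char)
  | [] => some (seenX, carets, digits)
  | c :: rest =>
    if c = '^' then
      if rest.head? = some 'x' then none
      else altLoop seenX (carets + 1) digits rest
    else if c = 'x' then
      if ((rest.head?.map PySem.Chars.isdigit).getD false) then none
      else altLoop true carets digits rest
    else if carets = 1 && PySem.Chars.isdigit c then altLoop seenX carets (digits ++ [c]) rest
    else altLoop seenX carets digits rest

def get_pow_alt (term : String) : Int :=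
  (match altLoop false 0 [] term.toList with
   | none => none
   | some (seenX, carets, digits) =>
     if carets = 0 then some (if seenX then (1 : Int) else 0)
     else PySem.Int.ofChars? digits).getD 0

-- ===== PRECONDITION & SPEC =====
-- Pre_ excludes exactly the inputs where Python A raises: TypeError on an adjacent '^x' pair or an
-- 'x' followed by a digit, and ValueError (int('')) when the term contains '^' but the segment
-- between the first '^' and the next '^' (or the end) contains no digit.  B raises there too.
def Pre_get_pow (term : String) : Prop :=
  (∀ p ∈ term.toList.zip term.toList.tail,
      ¬(p.1 = '^' ∧ p.2 = 'x') ∧ ¬(p.1 = 'x' ∧ PySem.Chars.isdigit p.2 = true)) ∧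
  ('^' ∈ term.toList →
      (((term.toList.dropWhile (· ≠ '^')).tail.takeWhile (· ≠ '^')).any
        PySem.Chars.isdigit) = true)
instance (term : String) : Decidable (Pre_get_pow term) := by unfold Pre_get_pow; infer_instance

def pvWitness_get_pow : String := "3x^25"

def Spec_get_pow (term : String) (out : Int) : Prop := out = get_pow_alt term
instance (term : String) (out : Int) : Decidable (Spec_get_pow term out) := by
  unfold Spec_get_pow; infer_instance

-- ===== CLAIM (what is proved, stated in full; the proofs are below) =====
def Claim_equal_get_pow : Prop :=
  ∀ (term : String), Dom_get_pow term → Pre_get_pow term → Spec_get_pow term (get_pow term)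

-- ===== LEMMAS AND PROOFS =====

-- "no bad adjacent pair" invariant shared by both proofs
def Good (l : List Char) : Prop :=
  ∀ p ∈ l.zip l.tail,
    ¬(p.1 = '^' ∧ p.2 = 'x') ∧ ¬(p.1 = 'x' ∧ PySem.Chars.isdigit p.2 = true)

theorem good_tail {c : Char} {rest : List Char} (h : Good (c :: rest)) : Good rest := by
  intro p hp
  apply h
  cases rest with
  | nil => simp at hp
  | cons b t => simpa using Or.inr hp

theorem good_pair {c b : Char} {t : List Char} (h : Good (c :: b :: t)) :
    ¬(c = '^' ∧ b = 'x') ∧ ¬(c = 'x' ∧ PySem.Chars.isdigit b = true) := by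
  exact h (c, b) (by simp)

theorem validateLoop_good (l : List Char) (hg : Good l) :
    ∀ idxs : List Int, (∀ i ∈ idxs, 0 ≤ i ∧ i < (l.length : Int) - 1) →
      validateLoop l idxs = some true := by
  intro idxs
  induction idxs with
  | nil => intro _; simp [validateLoop]
  | cons i idxs ih =>
    intro hb
    obtain ⟨h0, h1⟩ := hb i (by simp)
    have hk1 : i.toNat + 1 < l.length := by omega
    have hk0 : i.toNat < l.length := by omega
    have hdrop : l.drop i.toNat = l[i.toNat] :: l[i.toNat + 1] :: l.drop (i.toNat + 2) := by
      rw [List.drop_eq_getElem_cons hk0, List.drop_eq_getElem_cons hk1]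
    have hslice : PySem.List.slice l (some i) (some (i + 2)) = [l[i.toNat], l[i.toNat + 1]] := by
      rw [PySem.List.slice_toNat l h0 (by omega)]
      have h2 : (i + 2).toNat - i.toNat = 2 := by omega
      rw [h2, hdrop]
      rfl
    have hmem : (l[i.toNat], l[i.toNat + 1]) ∈ l.zip l.tail := by
      have hzl : i.toNat < (l.zip l.tail).length := by
        rw [List.length_zip, List.length_tail]
        omega
      have : (l.zip l.tail)[i.toNat] = (l[i.toNat], l[i.toNat + 1]) := by
        rw [List.getElem_zip]
        congr 1
        rw [List.getElem_tail]
      rw [← this]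
      exact List.getElem_mem hzl
    obtain ⟨hp1, hp2⟩ := hg _ hmem
    have hget : PySem.List.pyGet? l i = some l[i.toNat] :=
      PySem.List.pyGet?_eq_some_getElem l h0 (by omega)
    have hget1 : PySem.List.pyGet? l (i + 1) = some l[i.toNat + 1] := by
      have := PySem.List.pyGet?_eq_some_getElem l (i := i + 1) (by omega) (by omega)
      rw [this]
      have hidx : (i + 1).toNat = i.toNat + 1 := by omega
      congr 1
      simp [hidx]
    rw [validateLoop]
    have hne : ¬ PySem.List.slice l (some i) (some (i + 2)) = ['^', 'x'] := by
      rw [hslice]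
      intro h
      simp at h
      exact hp1 ⟨h.1, h.2⟩
    rw [if_neg hne, hget]
    dsimp only
    by_cases hx : l[i.toNat] = 'x'
    · rw [if_pos hx, hget1]
      dsimp only
      have : PySem.Chars.isdigit l[i.toNat + 1] = false := by
        by_contra h
        exact hp2 ⟨hx, by simpa using h⟩
      rw [this]
      simp only [Bool.false_eq_true, if_false]
      exact ih (fun j hj => hb j (by simp [hj]))
    · rw [if_neg hx]
      exact ih (fun j hj => hb j (by simp [hj]))

theorem validate_term_good (l : List Char) (hg : Good l) : validate_term l = some true := by
  unfold validate_term
  apply validateLoop_good l hg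
  intro i hi
  have := (PySem.List.mem_pyRange_one).mp hi
  omega

theorem powLoop_eq (p : List Char) (l : List Char) :
    powLoop p l = p ++ l.filter PySem.Chars.isdigit := by
  induction l generalizing p with
  | nil => simp [powLoop]
  | cons c rest ih =>
    by_cases hc : PySem.Chars.isdigit c
    · simp [powLoop, hc, ih]
    · simp [powLoop, hc, ih]

-- the segment split('^')[1] reads: between the first '^' and the next '^' or the end
def seg (l : List Char) : List Char :=
  (l.dropWhile (· ≠ '^')).tail.takeWhile (· ≠ '^')

-- B's scan in closed form, by caret state
theorem altLoop_two (l : List Char) (hg : Good l) (sx : Bool) (ca : Int) (ds : List Char)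
    (hca : 2 ≤ ca) :
    altLoop sx ca ds l = some (sx || l.contains 'x', ca + (l.count '^' : Int), ds) := by
  revert hg hca
  induction l generalizing sx ca with
  | nil => intro hg hca; simp [altLoop]
  | cons c rest ih =>
    intro hg hca
    by_cases hc : c = '^'
    · subst hc
      have hx : ¬ rest.head? = some 'x' := by
        cases rest with
        | nil => simp
        | cons b t =>
          have := (good_pair hg).1
          simp only [List.head?_cons, Option.some.injEq]
          intro hb; exact this ⟨rfl, hb⟩
      rw [altLoop, if_pos rfl, if_neg hx, ih sx (ca + 1) (good_tail hg) (by omega)]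
      simp
      ring
    · by_cases hx : c = 'x'
      · subst hx
        have hd : ¬ ((rest.head?.map PySem.Chars.isdigit).getD false) = true := by
          cases rest with
          | nil => simp
          | cons b t =>
            have := (good_pair hg).2
            simp only [List.head?_cons, Option.map_some, Option.getD_some]
            intro hb; exact this ⟨rfl, hb⟩
        rw [altLoop, if_neg hc, if_pos rfl, if_neg hd, ih true ca (good_tail hg) hca]
        simp [hc]
      · have hcond : (decide (ca = 1) && PySem.Chars.isdigit c) = false := by
          have : ¬ ca = 1 := by omega
          simp [this]
        rw [altLoop, if_neg hc, if_neg hx, hcond]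
        simp only [Bool.false_eq_true, if_false]
        rw [ih sx ca (good_tail hg) hca]
        have : ¬ 'x' = c := fun h => hx h.symm
        simp [hc, this]

theorem altLoop_one (l : List Char) (hg : Good l) (sx : Bool) (ds : List Char) :
    altLoop sx 1 ds l =
      some (sx || l.contains 'x', 1 + (l.count '^' : Int),
            ds ++ (l.takeWhile (· ≠ '^')).filter PySem.Chars.isdigit) := by
  revert hg
  induction l generalizing sx ds with
  | nil => intro hg; simp [altLoop]
  | cons c rest ih =>
    intro hg
    by_cases hc : c = '^'
    · subst hc
      have hx : ¬ rest.head? = some 'x' := by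
        cases rest with
        | nil => simp
        | cons b t =>
          have := (good_pair hg).1
          simp only [List.head?_cons, Option.some.injEq]
          intro hb; exact this ⟨rfl, hb⟩
      rw [altLoop, if_pos rfl, if_neg hx]
      norm_num
      rw [altLoop_two rest (good_tail hg) sx 2 ds (by omega)]
      simp
      ring
    · by_cases hx : c = 'x'
      · subst hx
        have hd : ¬ ((rest.head?.map PySem.Chars.isdigit).getD false) = true := by
          cases rest with
          | nil => simp
          | cons b t =>
            have := (good_pair hg).2
            simp only [List.head?_cons, Option.map_some, Option.getD_some]
            intro hb; exact this ⟨rfl, hb⟩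
        rw [altLoop, if_neg hc, if_pos rfl, if_neg hd, ih true ds (good_tail hg)]
        have hdig : PySem.Chars.isdigit 'x' = false := by decide
        simp [List.takeWhile, hc, hdig]
      · by_cases hd : PySem.Chars.isdigit c = true
        · rw [altLoop, if_neg hc, if_neg hx]
          have hcond : (decide ((1:Int) = 1) && PySem.Chars.isdigit c) = true := by simp [hd]
          rw [hcond]
          simp only [if_true]
          rw [ih sx (ds ++ [c]) (good_tail hg)]
          have : ¬ 'x' = c := fun h => hx h.symm
          simp [List.takeWhile, hc, hd, this]
        · rw [altLoop, if_neg hc, if_neg hx]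
          have hcond : (decide ((1:Int) = 1) && PySem.Chars.isdigit c) = false := by
            simp [hd]
          rw [hcond]
          simp only [Bool.false_eq_true, if_false]
          rw [ih sx ds (good_tail hg)]
          have : ¬ 'x' = c := fun h => hx h.symm
          simp [List.takeWhile, hc, hd, this]

theorem altLoop_zero (l : List Char) (hg : Good l) (sx : Bool) (ds : List Char) :
    altLoop sx 0 ds l =
      some (sx || l.contains 'x', (l.count '^' : Int),
            ds ++ (seg l).filter PySem.Chars.isdigit) := by
  revert hg
  induction l generalizing sx with
  | nil => intro hg; simp [altLoop, seg]
  | cons c rest ih =>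
    intro hg
    by_cases hc : c = '^'
    · subst hc
      have hx : ¬ rest.head? = some 'x' := by
        cases rest with
        | nil => simp
        | cons b t =>
          have := (good_pair hg).1
          simp only [List.head?_cons, Option.some.injEq]
          intro hb; exact this ⟨rfl, hb⟩
      rw [altLoop, if_pos rfl, if_neg hx]
      norm_num
      rw [altLoop_one rest (good_tail hg) sx ds]
      simp [seg, List.dropWhile]
      omega
    · by_cases hx : c = 'x'
      · subst hx
        have hd : ¬ ((rest.head?.map PySem.Chars.isdigit).getD false) = true := by
          cases rest with
          | nil => simp
          | cons b t =>
            have := (good_pair hg).2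
            simp only [List.head?_cons, Option.map_some, Option.getD_some]
            intro hb; exact this ⟨rfl, hb⟩
        rw [altLoop, if_neg hc, if_pos rfl, if_neg hd, ih true (good_tail hg)]
        simp [seg, List.dropWhile, hc]
      · rw [altLoop, if_neg hc, if_neg hx]
        have hcond : (decide ((0:Int) = 1) && PySem.Chars.isdigit c) = false := by simp
        rw [hcond]
        simp only [Bool.false_eq_true, if_false]
        rw [ih sx (good_tail hg)]
        have : ¬ 'x' = c := fun h => hx h.symm
        simp [seg, List.dropWhile, hc, this]

-- split('^') characterisation
def mySplit : List Char → List (List Char)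
  | [] => [[]]
  | c :: t => if c = '^' then [] :: mySplit t else (mySplit t).modifyHead (c :: ·)

theorem mySplit_ne_nil (l : List Char) : mySplit l ≠ [] := by
  cases l with
  | nil => simp [mySplit]
  | cons c t =>
    by_cases hc : c = '^'
    · simp [mySplit, hc]
    · simp only [mySplit, hc, if_false]
      cases h : mySplit t with
      | nil => exact absurd h (mySplit_ne_nil t)
      | cons a r => simp

theorem modifyHead_modifyHead_char (c : Char) (cur : List Char) (m : List (List Char)) :
    (m.modifyHead (c :: ·)).modifyHead (fun s => cur.reverse ++ s) =
      m.modifyHead (fun s => (c :: cur).reverse ++ s) := by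
  cases m <;> simp

theorem splitOn_go_eq (l : List Char) :
    ∀ (fuel : Nat) (cur : List Char) (acc : List (List Char)), l.length ≤ fuel →
      PySem.Chars.splitOn.go ['^'] fuel l cur acc =
        acc.reverse ++ (mySplit l).modifyHead (fun s => cur.reverse ++ s) := by
  induction l with
  | nil =>
    intro fuel cur acc _
    cases fuel <;> simp [PySem.Chars.splitOn.go, mySplit]
  | cons c rest ih =>
    intro fuel cur acc hf
    cases fuel with
    | zero => simp at hf
    | succ f =>
      rw [PySem.Chars.splitOn.go]
      by_cases hc : c = '^'
      · subst hc
        have hpre : List.isPrefixOf ['^'] ('^' :: rest) = true := by simp [List.isPrefixOf]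
        rw [if_pos hpre]
        have : List.drop (['^'] : List Char).length ('^' :: rest) = rest := by simp
        rw [this, ih f [] (cur.reverse :: acc) (by simpa using Nat.le_of_succ_le_succ hf)]
        rw [mySplit]
        have hid : (fun s : List Char => [].reverse ++ s) = id := by funext s; simp
        rw [hid, List.modifyHead_id]
        simp
      · have hpre : ¬ List.isPrefixOf ['^'] (c :: rest) = true := by
          simp [List.isPrefixOf]
          intro h; exact absurd h.symm hc
        rw [if_neg hpre, ih f (c :: cur) acc (by simpa using Nat.le_of_succ_le_succ hf)]
        rw [mySplit]
        simp only [hc, if_false]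
        rw [modifyHead_modifyHead_char]

theorem splitOn_eq_mySplit (l : List Char) : PySem.Chars.splitOn l ['^'] = mySplit l := by
  rw [PySem.Chars.splitOn, splitOn_go_eq l (l.length + 1) [] [] (by omega)]
  have : (fun s : List Char => List.reverse [] ++ s) = id := by funext s; simp
  rw [this, List.modifyHead_id]
  simp

theorem mySplit_head (l : List Char) : (mySplit l).head? = some (l.takeWhile (· ≠ '^')) := by
  induction l with
  | nil => simp [mySplit]
  | cons c t ih =>
    by_cases hc : c = '^'
    · simp [mySplit, hc, List.takeWhile]
    · cases h : mySplit t with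
      | nil => exact absurd h (mySplit_ne_nil t)
      | cons a r =>
        rw [h] at ih
        simp at ih
        simp [mySplit, hc, h, List.takeWhile, ih]

theorem mySplit_of_mem (l : List Char) (h : '^' ∈ l) :
    ∃ r, mySplit l = l.takeWhile (· ≠ '^') :: seg l :: r := by
  induction l with
  | nil => simp at h
  | cons c t ih =>
    by_cases hc : c = '^'
    · subst hc
      cases h' : mySplit t with
      | nil => exact absurd h' (mySplit_ne_nil t)
      | cons a r =>
        have ha : a = t.takeWhile (· ≠ '^') := by
          have := mySplit_head t
          rw [h'] at this
          simpa using this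
        refine ⟨r, ?_⟩
        rw [mySplit, if_pos rfl, h', ha]
        simp [seg, List.takeWhile, List.dropWhile]
    · have ht : '^' ∈ t := by
        cases h with
        | head => exact absurd rfl hc
        | tail _ h => exact h
      obtain ⟨r, hr⟩ := ih ht
      refine ⟨r, ?_⟩
      rw [mySplit]
      simp only [hc, if_false]
      rw [hr]
      simp [seg, List.takeWhile, List.dropWhile, hc]

theorem isIn_single (c : Char) (l : List Char) :
    PySem.Chars.isIn [c] l = l.contains c := by
  by_cases h : c ∈ l
  · rw [List.contains_eq_mem]
    simp only [h, decide_true]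
    rw [PySem.Chars.isIn_iff_infix]
    obtain ⟨pre, suf, rfl⟩ := List.mem_iff_append.mp h
    exact ⟨pre, suf, by simp⟩
  · rw [List.contains_eq_mem]
    simp only [h, decide_false]
    rw [PySem.Chars.isIn_eq_false_iff]
    intro hinf
    exact h (hinf.subset (by simp))

theorem pyGet?_one (a b : List Char) (r : List (List Char)) :
    PySem.List.pyGet? (a :: b :: r) 1 = some b := by
  simp

-- ===== VERDICT (by name: the statement is the Claim_ definition above) =====
theorem get_pow_spec : Claim_equal_get_pow := by
  intro term _ hpre
  obtain ⟨hg', _⟩ := hpre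
  have hg : Good term.toList := hg'
  unfold Spec_get_pow get_pow get_pow_alt get_powAux
  dsimp only
  rw [validate_term_good term.toList hg, altLoop_zero term.toList hg false []]
  by_cases hc : '^' ∈ term.toList
  · have h1 : PySem.Chars.isIn ['^'] term.toList = true := by
      rw [isIn_single, List.contains_eq_mem]; simpa using hc
    have hcount : ¬ ((List.count '^' term.toList : Int) = 0) := by
      have := List.count_pos_iff.mpr hc
      omega
    obtain ⟨r, hsplit⟩ := mySplit_of_mem term.toList hc
    simp only [h1, Bool.not_true, Bool.and_false, Bool.false_eq_true, if_false,
      splitOn_eq_mySplit, hsplit, pyGet?_one, if_neg hcount, powLoop_eq,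
      List.nil_append]
  · have h1 : PySem.Chars.isIn ['^'] term.toList = false := by
      rw [isIn_single, List.contains_eq_mem]; simpa using hc
    have hcount : (List.count '^' term.toList : Int) = 0 := by
      have := List.count_eq_zero.mpr hc
      omega
    have hx : PySem.Chars.isIn ['x'] term.toList = term.toList.contains 'x' := isIn_single _ _
    simp only [h1, Bool.not_false, Bool.and_true, hx, if_pos hcount]
    by_cases hmx : 'x' ∈ term.toList
    · simp [hmx]
    · simp [hmx]
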